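-- pv_equiv track=rewrite | github.com/emlbrg/atCoder_solutions | ABC136D.py | final_positions
-- ===== SOURCE A (Python) =====
-- def final_positions(S: str):
--     n = len(S)
--     result = [0] * n
--
--     for i in range(n):
--         if S[i] == 'R':
--             # If the character is 'R', this child will move to the right
--             result[i] += 1  # Start from the current position
--             if i + 1 < n:
--                 result[i + 1] += result[i]  # Move to the right position
--         elif S[i] == 'L':
--             # If the character is 'L', children will be moved to the left
--             if i - 1 >= 0:
--                 result[i - 1] += result[i]  # Move to the left position
--
--     return result
-- ===== SOURCE B (Python) =====
-- def final_positions(S: str):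
--     # Single left-to-right pass with O(1) state: `carry` is the length of the
--     # R-run ending just before the current position; `pending` is the previous
--     # cell's value awaiting the possible 'L' contribution from the current char.
--     out = []
--     carry = 0
--     pending = None
--     for c in S:
--         if pending is not None:
--             out.append(pending + (carry if c == 'L' else 0))
--         if c == 'R':
--             carry += 1
--             pending = carry
--         else:
--             pending = carry
--             carry = 0
--     if pending is not None:
--         out.append(pending)
--     return out
-- ===== Notes on version B (the rewrite author's own statement) =====
-- stated objective: alternative
-- what changed: Replaces A's index loop with random-access read-modify-write propagation over a preallocated array by a single forward pass over the characters keeping only O(1) state (the current R-run length and the previous cell pending its possible 'L' contribution), appending each finished cell once.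
import Mathlib
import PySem

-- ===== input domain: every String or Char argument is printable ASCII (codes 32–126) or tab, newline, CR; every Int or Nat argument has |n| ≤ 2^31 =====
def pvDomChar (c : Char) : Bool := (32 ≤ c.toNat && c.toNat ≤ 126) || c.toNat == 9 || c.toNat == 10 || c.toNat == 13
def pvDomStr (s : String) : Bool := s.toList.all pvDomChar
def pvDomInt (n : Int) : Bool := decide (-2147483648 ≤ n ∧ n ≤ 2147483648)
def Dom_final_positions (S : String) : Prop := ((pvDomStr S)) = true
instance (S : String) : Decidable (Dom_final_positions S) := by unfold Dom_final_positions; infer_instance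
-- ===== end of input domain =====

-- ===== PORT A =====
-- B replaces A's random-access array propagation with a single O(1)-state pass (objective: simpler/alternative).
-- step of A's index loop: the body of 'for i in range(n)' acting on the result list
def stepA (cs : List Char) (n : Int) (r : List Int) (i : Int) : List Int :=
  if PySem.List.pyGet? cs i = some 'R' then
    let r1 := PySem.List.pySetD r i (PySem.List.pyGetD r i 0 + 1)
    if i + 1 < n then
      PySem.List.pySetD r1 (i + 1) (PySem.List.pyGetD r1 (i + 1) 0 + PySem.List.pyGetD r1 i 0)
    else r1
  else if PySem.List.pyGet? cs i = some 'L' then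
    if i - 1 ≥ 0 then
      PySem.List.pySetD r (i - 1) (PySem.List.pyGetD r (i - 1) 0 + PySem.List.pyGetD r i 0)
    else r
  else r

def final_positions (S : String) : List Int :=
  let cs := S.toList
  let n : Int := cs.length
  (PySem.List.pyRange 0 n 1).foldl (stepA cs n) (List.replicate cs.length 0)

-- ===== PORT B =====
-- state: (out, pending, carry) as in Source B's loop
def stepB (st : List Int × Option Int × Int) (c : Char) : List Int × Option Int × Int :=
  let out := match st.2.1 with
    | some p => st.1 ++ [p + (if c = 'L' then st.2.2 else 0)]
    | none => st.1
  if c = 'R' then (out, some (st.2.2 + 1), st.2.2 + 1)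
  else (out, some st.2.2, 0)

-- the final 'if pending is not None: out.append(pending)' of Source B
def finishB (st : List Int × Option Int × Int) : List Int :=
  match st.2.1 with
  | some p => st.1 ++ [p]
  | none => st.1

def final_positions_alt (S : String) : List Int :=
  finishB (S.toList.foldl stepB ([], none, 0))

-- ===== PRECONDITION & SPEC =====
def Spec_final_positions (S : String) (out : List Int) : Prop := out = final_positions_alt S
instance (S : String) (out : List Int) : Decidable (Spec_final_positions S out) := by unfold Spec_final_positions; infer_instance

-- ===== CLAIM (what is proved, stated in full; the proofs are below) =====
def Claim_equal_final_positions : Prop := ∀ (S : String), Dom_final_positions S → Spec_final_positions S (final_positions S)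

-- ===== LEMMAS AND PROOFS =====

-- reference function: cell value = incoming R-run + own R bit + (next run if next char is 'L')
def ref (carry : Int) : List Char → List Int
  | [] => []
  | c :: rest =>
    if c = 'R' then (carry + 1 + (if rest.head? = some 'L' then carry + 1 else 0)) :: ref (carry + 1) rest
    else carry :: ref 0 rest

-- add v to the last element (identity on [])
def bumpLast : List Int → Int → List Int
  | [], _ => []
  | [x], v => [x + v]
  | x :: y :: t, v => x :: bumpLast (y :: t) v

theorem bumpLast_append_singleton (p : List Int) (x v : Int) :
    bumpLast (p ++ [x]) v = p ++ [x + v] := by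
  induction p with
  | nil => rfl
  | cons a q ih =>
    cases q with
    | nil => rfl
    | cons b t => simpa [bumpLast] using ih

theorem length_bumpLast (p : List Int) (v : Int) : (bumpLast p v).length = p.length := by
  induction p with
  | nil => rfl
  | cons a q ih =>
    cases q with
    | nil => rfl
    | cons b t => simpa [bumpLast] using ih

theorem getD_mid (p t : List Int) (x d : Int) : (p ++ x :: t).getD p.length d = x := by
  simp [List.getD_eq_getElem?_getD]

theorem set_mid (p t : List Int) (x y : Int) : (p ++ x :: t).set p.length y = p ++ y :: t := by
  induction p with
  | nil => rfl
  | cons a q ih => simp [ih]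

theorem setLast (q l : List Int) (v : Int) (h : q ≠ []) :
    (q ++ l).set (q.length - 1) ((q ++ l).getD (q.length - 1) 0 + v) = bumpLast q v ++ l := by
  induction q with
  | nil => exact absurd rfl h
  | cons a q ih =>
    cases q with
    | nil => simp [bumpLast]
    | cons b t =>
      have ih' := ih (by simp)
      simp only [List.length_cons, Nat.add_sub_cancel, List.cons_append] at ih' ⊢
      simp only [List.getD_cons_succ, List.set_cons_succ, bumpLast]
      rw [ih']
      rfl

theorem getD_mid2 (p t : List Int) (x y d : Int) : (p ++ x :: y :: t).getD (p.length + 1) d = y := by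
  simp [List.getD_eq_getElem?_getD]

theorem set_mid2 (p t : List Int) (x y v : Int) : (p ++ x :: y :: t).set (p.length + 1) v = p ++ x :: v :: t := by
  simp

-- ===== A-side main loop invariant =====
theorem A_loop : ∀ (rest' : List Char) (cs pre : List Char) (c : Char) (p : List Int) (carry : Int),
    cs = pre ++ c :: rest' → p.length = pre.length →
    (PySem.List.pyRange (p.length : Int) (cs.length : Int) 1).foldl (stepA cs (cs.length : Int))
        (p ++ carry :: List.replicate rest'.length 0)
      = (if c = 'L' then bumpLast p carry else p) ++ ref carry (c :: rest') := by
  intro rest'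
  induction rest' with
  | nil =>
    intro cs pre c p carry hcs hp
    have hn : (cs.length : Int) = (p.length : Int) + 1 := by subst hcs; simp [hp]
    have hget : PySem.List.pyGet? cs (p.length : Int) = some c := by
      subst hcs; rw [hp]; exact PySem.List.pyGet?_append_length pre [] c
    rw [hn, PySem.List.pyRange_one_singleton]
    simp only [List.length_nil, List.replicate, List.foldl_cons, List.foldl_nil]
    unfold stepA
    rw [hget]
    by_cases hcR : c = 'R'
    · subst hcR
      simp [ref]
    · by_cases hcL : c = 'L'
      · subst hcL
        simp only [Option.some.injEq, reduceIte, Char.reduceEq]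
        by_cases hp0 : p = []
        · subst hp0
          simp [ref, bumpLast]
        · have h1 : 1 ≤ p.length := List.length_pos_iff.mpr hp0
          have hcast : (p.length : Int) - 1 = ((p.length - 1 : Nat) : Int) := by omega
          rw [if_pos (by omega), hcast]
          simp only [PySem.List.pySetD_natCast, PySem.List.pyGetD_natCast, getD_mid]
          rw [setLast p [carry] carry hp0]
          simp [ref]
      · simp [ref, hcR, hcL]
  | cons c2 rest'' ih =>
    intro cs pre c p carry hcs hp
    have hlen : cs.length = pre.length + rest''.length + 2 := by subst hcs; simp; omega
    have hk : (p.length : Int) < (cs.length : Int) := by rw [hp]; exact_mod_cast by omega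
    rw [PySem.List.pyRange_one_cons hk, List.foldl_cons]
    have hget : PySem.List.pyGet? cs (p.length : Int) = some c := by
      subst hcs; rw [hp]; exact PySem.List.pyGet?_append_length pre (c2 :: rest'') c
    simp only [List.length_cons, List.replicate_succ]
    by_cases hcR : c = 'R'
    · subst hcR
      have hstep : stepA cs (cs.length : Int) (p ++ carry :: 0 :: List.replicate rest''.length 0)
          (p.length : Int)
          = (p ++ [carry + 1]) ++ (carry + 1) :: List.replicate rest''.length 0 := by
        have hguard : (p.length : Int) + 1 < (cs.length : Int) := by
          rw [hp]; exact_mod_cast by omega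
        have hcast1 : (p.length : Int) + 1 = ((p.length + 1 : Nat) : Int) := by push_cast; ring
        unfold stepA
        rw [hget]
        simp only [Option.some.injEq, reduceIte, Char.reduceEq]
        rw [if_pos hguard, hcast1]
        simp only [PySem.List.pySetD_natCast, PySem.List.pyGetD_natCast, getD_mid, getD_mid2,
          set_mid, set_mid2, zero_add]
        simp
      have hstart : (p.length : Int) + 1 = ((p ++ [carry + 1]).length : Int) := by simp
      rw [hstep, hstart,
        ih cs (pre ++ ['R']) c2 (p ++ [carry + 1]) (carry + 1) (by rw [hcs]; simp) (by simp [hp])]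
      by_cases hc2 : c2 = 'L'
      · subst hc2
        simp [ref, bumpLast_append_singleton]
      · simp [ref, hc2]
    · by_cases hcL : c = 'L'
      · subst hcL
        have hstep : stepA cs (cs.length : Int) (p ++ carry :: 0 :: List.replicate rest''.length 0)
            (p.length : Int)
            = (bumpLast p carry ++ [carry]) ++ 0 :: List.replicate rest''.length 0 := by
          unfold stepA
          rw [hget]
          simp only [Option.some.injEq, reduceIte, Char.reduceEq]
          by_cases hp0 : p = []
          · subst hp0; simp [bumpLast]
          · have h1 : 1 ≤ p.length := List.length_pos_iff.mpr hp0
            have hcast : (p.length : Int) - 1 = ((p.length - 1 : Nat) : Int) := by omega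
            rw [if_pos (by omega), hcast]
            simp only [PySem.List.pySetD_natCast, PySem.List.pyGetD_natCast, getD_mid]
            rw [setLast p (carry :: 0 :: List.replicate rest''.length 0) carry hp0]
            simp
        rw [hstep]
        have hstart : (p.length : Int) + 1 = ((bumpLast p carry ++ [carry]).length : Int) := by
          simp [length_bumpLast]
        rw [hstart,
          ih cs (pre ++ ['L']) c2 (bumpLast p carry ++ [carry]) 0 (by rw [hcs]; simp)
            (by simp [length_bumpLast, hp])]
        by_cases hc2 : c2 = 'L'
        · subst hc2
          simp [ref, bumpLast_append_singleton]
        · simp [ref, hc2, Char.reduceEq]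
      · have hstep : stepA cs (cs.length : Int) (p ++ carry :: 0 :: List.replicate rest''.length 0)
            (p.length : Int)
            = (p ++ [carry]) ++ 0 :: List.replicate rest''.length 0 := by
          unfold stepA
          rw [hget]
          simp [hcR, hcL]
        have hstart : (p.length : Int) + 1 = (((p ++ [carry]).length : Nat) : Int) := by simp
        rw [hstep, hstart,
          ih cs (pre ++ [c]) c2 (p ++ [carry]) 0 (by rw [hcs]; simp) (by simp [hp])]
        by_cases hc2 : c2 = 'L'
        · subst hc2
          simp [ref, bumpLast_append_singleton, hcR, hcL]
        · simp [ref, hc2, hcR, hcL]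

theorem A_eq_ref (S : String) : final_positions S = ref 0 S.toList := by
  unfold final_positions
  cases h : S.toList with
  | nil => simp [ref, PySem.List.pyRange_one_eq_nil]
  | cons c rest =>
    have hA := A_loop rest (c :: rest) [] c [] 0 rfl rfl
    simpa [List.replicate_succ, bumpLast, ite_self] using hA

-- ===== B-side loop =====
theorem B_loop : ∀ (cs : List Char) (out : List Int) (p carry : Int),
    finishB (cs.foldl stepB (out, some p, carry))
      = out ++ (p + (if cs.head? = some 'L' then carry else 0)) :: ref carry cs := by
  intro cs
  induction cs with
  | nil => intro out p carry; simp [finishB, ref]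
  | cons c rest ih =>
    intro out p carry
    by_cases hc : c = 'R'
    · subst hc
      simp only [List.foldl_cons, stepB, reduceIte]
      rw [ih]
      simp [ref]
    · simp only [List.foldl_cons, stepB, if_neg hc]
      rw [ih]
      simp [ref, hc, ite_self]

theorem B_eq_ref (S : String) : final_positions_alt S = ref 0 S.toList := by
  unfold final_positions_alt
  cases h : S.toList with
  | nil => simp [finishB, ref]
  | cons c rest =>
    by_cases hc : c = 'R'
    · subst hc
      simp only [List.foldl_cons, stepB, reduceIte]
      rw [B_loop]
      simp [ref]
    · simp only [List.foldl_cons, stepB, if_neg hc]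
      rw [B_loop]
      simp [ref, hc, ite_self]

-- ===== VERDICT (by name: the statement is the Claim_ definition above) =====
theorem final_positions_spec : Claim_equal_final_positions := by
  intro S _
  unfold Spec_final_positions
  rw [A_eq_ref, B_eq_ref]
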